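-- pv_equiv track=rewrite | github.com/Nghia03092004/nghia03092004.github.io | project_euler/problem_944/solution.py | inversion_distribution
-- ===== SOURCE A (Python) =====
-- def inversion_distribution(n):
--     """Compute exact distribution of inversions for permutations of size n.
--     Uses the recurrence: I(n,k) = sum_{j=0}^{min(k,n-1)} I(n-1, k-j).
--     The generating function for inversions is prod_{i=1}^{n} (1+x+...+x^{i-1}).
--     """
--     max_inv = n * (n - 1) // 2
--     dist = [0] * (max_inv + 1)
--     dist[0] = 1  # base: single element, 0 inversions
--     for i in range(2, n + 1):
--         new_dist = [0] * (max_inv + 1)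
--         prefix = [0] * (max_inv + 2)
--         for k in range(max_inv + 1):
--             prefix[k + 1] = prefix[k] + dist[k]
--         for k in range(max_inv + 1):
--             lo = max(0, k - (i - 1))
--             new_dist[k] = prefix[k + 1] - prefix[lo]
--         dist = new_dist
--     return dist
-- ===== SOURCE B (Python) =====
-- def inversion_distribution(n):
--     """Mahonian numbers: multiply by (1+x+...+x^(i-1)) using a sliding-window
--     running sum -- one fused pass per factor, no prefix-sum table."""
--     max_inv = n * (n - 1) // 2
--     dist = [1] + [0] * max_inv
--     for i in range(2, n + 1):
--         new_dist = []
--         run = 0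
--         for k in range(max_inv + 1):
--             run += dist[k]
--             if k >= i:
--                 run -= dist[k - i]
--             new_dist.append(run)
--         dist = new_dist
--     return dist
-- ===== Notes on version B (the rewrite author's own statement) =====
-- stated objective: simpler
-- what changed: Replaces the auxiliary prefix-sum table plus second windowed-difference pass with one fused pass per factor that maintains a sliding-window running sum (add dist[k], drop dist[k-i]), so no cumulative array is ever built.
import Mathlib
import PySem

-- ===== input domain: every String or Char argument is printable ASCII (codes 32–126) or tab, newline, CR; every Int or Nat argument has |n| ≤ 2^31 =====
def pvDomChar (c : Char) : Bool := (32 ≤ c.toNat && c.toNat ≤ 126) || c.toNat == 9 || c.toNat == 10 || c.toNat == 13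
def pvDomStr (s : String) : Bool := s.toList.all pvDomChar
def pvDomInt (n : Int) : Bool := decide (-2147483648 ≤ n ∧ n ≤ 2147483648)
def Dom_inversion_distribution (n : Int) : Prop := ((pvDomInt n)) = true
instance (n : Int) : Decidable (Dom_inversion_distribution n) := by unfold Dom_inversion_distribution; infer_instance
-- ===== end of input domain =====

-- B drops A's prefix-sum table and second differencing pass: one fused pass per factor
-- keeps a sliding-window running sum (add dist[k], drop dist[k-i]); same return value everywhere.

-- ===== PORT A =====
-- Literal transliteration of A: prefix-sum table, then windowed differences.
def inversion_distribution (n : Int) : List Int :=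
  let max_inv : Int := PySem.Int.floordiv (n * (n - 1)) 2
  let dist0 : List Int := PySem.List.pySetD (List.replicate (max_inv + 1).toNat (0 : Int)) 0 1
  (PySem.List.pyRange 2 (n + 1) 1).foldl (fun dist i =>
    let pfx : List Int :=
      (PySem.List.pyRange 0 (max_inv + 1) 1).foldl
        (fun p k =>
          PySem.List.pySetD p (k + 1) (PySem.List.pyGetD p k 0 + PySem.List.pyGetD dist k 0))
        (List.replicate (max_inv + 2).toNat (0 : Int))
    -- 'for k in range(max_inv+1): new_dist[k] = prefix[k+1] - prefix[lo]' (each slot written once, in order)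
    (PySem.List.pyRange 0 (max_inv + 1) 1).map (fun k =>
      let lo : Int := max 0 (k - (i - 1))
      PySem.List.pyGetD pfx (k + 1) 0 - PySem.List.pyGetD pfx lo 0))
    dist0

-- ===== PORT B =====
-- Literal transliteration of B: per factor i, one pass with state (new_dist, run);
-- 'run += dist[k]; if k >= i: run -= dist[k-i]; new_dist.append(run)'.
def inversion_distribution_alt (n : Int) : List Int :=
  let max_inv : Int := PySem.Int.floordiv (n * (n - 1)) 2
  let dist0 : List Int := 1 :: List.replicate max_inv.toNat (0 : Int)
  (PySem.List.pyRange 2 (n + 1) 1).foldl (fun dist i =>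
    ((PySem.List.pyRange 0 (max_inv + 1) 1).foldl
      (fun (st : List Int × Int) k =>
        let run1 := st.2 + PySem.List.pyGetD dist k 0
        let run2 := if i ≤ k then run1 - PySem.List.pyGetD dist (k - i) 0 else run1
        (st.1 ++ [run2], run2))
      ([], 0)).1)
    dist0

-- ===== PRECONDITION & SPEC =====
def Spec_inversion_distribution (n : Int) (out : List Int) : Prop := out = inversion_distribution_alt n
instance (n : Int) (out : List Int) : Decidable (Spec_inversion_distribution n out) := by unfold Spec_inversion_distribution; infer_instance

-- ===== CLAIM (what is proved, stated in full; the proofs are below) =====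
def Claim_equal_inversion_distribution : Prop := ∀ (n : Int), Dom_inversion_distribution n → Spec_inversion_distribution n (inversion_distribution n)

-- ===== LEMMAS AND PROOFS =====

/-- Partial sums of the entries of `d` (out-of-range entries read as 0, as both ports do). -/
def pvS (d : List Int) (t : Nat) : Int := ∑ u ∈ Finset.range t, d.getD u 0

theorem pvS_succ (d : List Int) (t : Nat) : pvS d (t + 1) = pvS d t + d.getD t 0 := by
  simp [pvS, Finset.sum_range_succ]

theorem pvGetDnn (xs : List Int) (i : Int) (h : 0 ≤ i) :
    PySem.List.pyGetD xs i 0 = xs.getD i.toNat 0 := by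
  conv_lhs => rw [← Int.toNat_of_nonneg h, PySem.List.pyGetD_natCast]

theorem pvGetDSet (xs : List Int) (n j : Nat) (v : Int) (h : n < xs.length) :
    (xs.set n v).getD j 0 = if j = n then v else xs.getD j 0 := by
  by_cases hj : j = n
  · subst hj; simp [List.getD, h]
  · simp [List.getD, List.getElem?_set_ne (fun hh => hj hh.symm), hj]

/-- The prefix fold of port A: after processing `range t`, slot `j` holds `pvS d j` for `j ≤ t`,
and 0 beyond. -/
theorem pvPrefixInv (M : Nat) (d : List Int) (t : Nat) (ht : t ≤ M + 1) :
    let P := ((List.range t).map (fun (k : Nat) => (k : Int))).foldl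
      (fun p k => PySem.List.pySetD p (k + 1) (PySem.List.pyGetD p k 0 + PySem.List.pyGetD d k 0))
      (List.replicate (M + 2) (0 : Int))
    P.length = M + 2 ∧ ∀ j : Nat, P.getD j 0 = if j ≤ t ∧ j ≤ M + 1 then pvS d j else 0 := by
  induction t with
  | zero =>
    refine ⟨by simp, fun j => ?_⟩
    simp only [List.range_zero, List.map_nil, List.foldl_nil]
    by_cases hj : j ≤ 0 ∧ j ≤ M + 1
    · have h0 : j = 0 := by omega
      subst h0
      simp [pvS, hj]
    · rw [if_neg hj]
      simp
  | succ t ih =>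
    obtain ⟨hlen, hval⟩ := ih (by omega)
    simp only [List.range_succ, List.map_append, List.foldl_append, List.map_cons, List.map_nil,
      List.foldl_cons, List.foldl_nil]
    set P := ((List.range t).map (fun (k : Nat) => (k : Int))).foldl
      (fun p k => PySem.List.pySetD p (k + 1) (PySem.List.pyGetD p k 0 + PySem.List.pyGetD d k 0))
      (List.replicate (M + 2) (0 : Int)) with hP
    have hcast : ((t : Int) + 1) = ((t + 1 : Nat) : Int) := by push_cast; ring
    rw [hcast, PySem.List.pySetD_natCast, PySem.List.pyGetD_natCast, PySem.List.pyGetD_natCast]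
    have hlt : t + 1 < P.length := by omega
    refine ⟨by simp [hlen], fun j => ?_⟩
    rw [pvGetDSet P (t+1) j _ hlt]
    by_cases hj : j = t + 1
    · subst hj
      rw [if_pos rfl, hval t, if_pos (show t ≤ t ∧ t ≤ M + 1 by omega),
        if_pos (show t + 1 ≤ t + 1 ∧ t + 1 ≤ M + 1 by omega), pvS_succ]
    · rw [if_neg hj, hval j]
      by_cases h1 : j ≤ t ∧ j ≤ M + 1
      · rw [if_pos h1, if_pos (show j ≤ t + 1 ∧ j ≤ M + 1 by omega)]
      · rw [if_neg h1, if_neg (show ¬ (j ≤ t + 1 ∧ j ≤ M + 1) by omega)]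

/-- Port B's fused pass: after `t` steps the state is the closed-form list and window sum. -/
theorem pvBInv (d : List Int) (i : Int) (hi : 2 ≤ i) (t : Nat) :
    ((List.range t).map (fun (k : Nat) => (k : Int))).foldl
      (fun (st : List Int × Int) k =>
        let run1 := st.2 + PySem.List.pyGetD d k 0
        let run2 := if i ≤ k then run1 - PySem.List.pyGetD d (k - i) 0 else run1
        (st.1 ++ [run2], run2))
      ([], 0)
    = ((List.range t).map (fun (k : Nat) => pvS d (k + 1) - pvS d (k + 1 - i.toNat)),
       pvS d t - pvS d (t - i.toNat)) := by
  induction t with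
  | zero => simp [pvS]
  | succ t ih =>
    simp only [List.range_succ, List.map_append, List.foldl_append, List.map_cons, List.map_nil,
      List.foldl_cons, List.foldl_nil, ih]
    rw [PySem.List.pyGetD_natCast]
    by_cases hk : i ≤ (t : Int)
    · rw [if_pos hk, pvGetDnn d _ (by omega)]
      have h1 : ((t : Int) - i).toNat = t - i.toNat := by omega
      have h2 : t + 1 - i.toNat = (t - i.toNat) + 1 := by omega
      have h3 : pvS d (t + 1) - pvS d (t + 1 - i.toNat)
          = pvS d t - pvS d (t - i.toNat) + d.getD t 0 - d.getD (t - i.toNat) 0 := by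
        rw [h2, pvS_succ d (t - i.toNat), pvS_succ d t]; ring
      rw [h1]
      refine Prod.ext ?_ ?_ <;> simp [h3]
    · rw [if_neg hk]
      have h2 : t + 1 - i.toNat = 0 := by omega
      have h3 : t - i.toNat = 0 := by omega
      have h4 : pvS d (t + 1) - pvS d (t + 1 - i.toNat)
          = pvS d t - pvS d (t - i.toNat) + d.getD t 0 := by
        rw [h2, h3, pvS_succ d t]; ring
      refine Prod.ext ?_ ?_ <;> simp [h4]

/-- One step of A (prefix table + windowed differences) equals one step of B (direct sums),
for every factor index `i ≥ 2`. -/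
theorem pvStepEq (M : Nat) (d : List Int) (i : Int) (hi : 2 ≤ i) :
    (let pfx : List Int :=
      (PySem.List.pyRange 0 ((M : Int) + 1) 1).foldl
        (fun p k =>
          PySem.List.pySetD p (k + 1) (PySem.List.pyGetD p k 0 + PySem.List.pyGetD d k 0))
        (List.replicate ((M : Int) + 2).toNat (0 : Int))
    (PySem.List.pyRange 0 ((M : Int) + 1) 1).map (fun k =>
      let lo : Int := max 0 (k - (i - 1))
      PySem.List.pyGetD pfx (k + 1) 0 - PySem.List.pyGetD pfx lo 0))
    = ((PySem.List.pyRange 0 ((M : Int) + 1) 1).foldl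
        (fun (st : List Int × Int) k =>
          let run1 := st.2 + PySem.List.pyGetD d k 0
          let run2 := if i ≤ k then run1 - PySem.List.pyGetD d (k - i) 0 else run1
          (st.1 ++ [run2], run2))
        ([], 0)).1 := by
  have hM2 : ((M : Int) + 2).toNat = M + 2 := by omega
  have hM1 : ((M : Int) + 1) = ((M + 1 : Nat) : Int) := by push_cast; ring
  rw [hM1, PySem.List.pyRange_zero_natCast, hM2]
  obtain ⟨hlen, hval⟩ := pvPrefixInv M d (M + 1) le_rfl
  rw [pvBInv d i hi (M + 1), List.map_map]
  apply List.map_congr_left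
  intro k hk
  have hkM : k < M + 1 := List.mem_range.mp hk
  simp only [Function.comp_apply]
  have e1 : ((k : Int) + 1) = ((k + 1 : Nat) : Int) := by push_cast; ring
  rw [e1, PySem.List.pyGetD_natCast, hval (k + 1), if_pos (show k + 1 ≤ M + 1 ∧ k + 1 ≤ M + 1 by omega)]
  rw [pvGetDnn _ _ (le_max_left _ _), hval _, if_pos (show (max 0 ((k:Int) - (i - 1))).toNat ≤ M + 1 ∧ _ by omega)]
  have e2 : (max 0 ((k : Int) - (i - 1))).toNat = k + 1 - i.toNat := by omega
  rw [e2]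

theorem pvMaxInvNonneg (n : Int) : 0 ≤ PySem.Int.floordiv (n * (n - 1)) 2 := by
  rw [PySem.Int.floordiv_eq_ediv_of_pos (by omega)]
  apply Int.ediv_nonneg _ (by omega)
  rcases Classical.em (n ≤ 0) with h | h
  · nlinarith
  · nlinarith

theorem pvMain (n : Int) : inversion_distribution n = inversion_distribution_alt n := by
  unfold inversion_distribution inversion_distribution_alt
  dsimp only
  have hmi := pvMaxInvNonneg n
  set mi := PySem.Int.floordiv (n * (n - 1)) 2 with hmidef
  have hM : mi = ((mi.toNat : Nat) : Int) := (Int.toNat_of_nonneg hmi).symm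
  have hbase : PySem.List.pySetD (List.replicate (mi + 1).toNat (0 : Int)) 0 1
      = 1 :: List.replicate mi.toNat (0 : Int) := by
    rw [PySem.List.pySetD_of_nonneg _ _ le_rfl]
    have h1 : (mi + 1).toNat = mi.toNat + 1 := by omega
    rw [h1, List.replicate_succ]
    rfl
  rw [hbase]
  apply PySem.List.foldl_congr_mem
  intro acc i hi
  have h2 : 2 ≤ i := (PySem.List.mem_pyRange_one.mp hi).1
  have step := pvStepEq mi.toNat acc i h2
  rw [hM]
  exact step

-- ===== VERDICT (by name: the statement is the Claim_ definition above) =====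
theorem inversion_distribution_spec : Claim_equal_inversion_distribution := by
  intro n _
  unfold Spec_inversion_distribution
  exact pvMain n
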